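-- pv_equiv track=rewrite | github.com/mako1018/civitai-prompt-collector | src/collector/categorizer.py | summarize_clusters
-- ===== SOURCE A (Python) =====
-- from typing import List, Dict
--
-- def summarize_clusters(prompts: List[str], labels) -> Dict[int, str]:
--     from collections import Counter
--     clusters = {}
--     for lbl, txt in zip(labels, prompts):
--         clusters.setdefault(int(lbl), []).append(txt)
--     summaries = {}
--     for lbl, items in clusters.items():
--         if lbl == -1:
--             summaries[lbl] = "noise"
--             continue
--         words = " ".join(items).lower().split()
--         common = [w for w, _ in Counter(words).most_common(10) if len(w) > 3]
--         summaries[lbl] = " ".join(common[:5]) if common else ""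
--     return summaries
-- ===== SOURCE B (Python) =====
-- def summarize_clusters(prompts, labels):
--     n = min(len(prompts), len(labels))
--     ils = [int(l) for l in labels[:n]]
--     out = {}
--     for l in list(dict.fromkeys(ils)):
--         if l == -1:
--             out[l] = "noise"
--             continue
--         toks = [w for li, txt in zip(ils, prompts) if li == l
--                 for w in txt.lower().split()]
--         ranked = sorted(dict.fromkeys(toks), key=toks.count, reverse=True)[:10]
--         good = [w for w in ranked if len(w) > 3]
--         out[l] = " ".join(good[:5]) if good else ""
--     return out
-- ===== Notes on version B (the rewrite author's own statement) =====
-- stated objective: alternative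
-- what changed: B drops A's hash-grouping of texts and its Counter entirely: it first lists the distinct labels in order of appearance, then for each label rescans the zipped input to gather that label's tokens directly, and ranks the distinct tokens by list.count under one stable reverse sort instead of Counter.most_common.
import Mathlib
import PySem

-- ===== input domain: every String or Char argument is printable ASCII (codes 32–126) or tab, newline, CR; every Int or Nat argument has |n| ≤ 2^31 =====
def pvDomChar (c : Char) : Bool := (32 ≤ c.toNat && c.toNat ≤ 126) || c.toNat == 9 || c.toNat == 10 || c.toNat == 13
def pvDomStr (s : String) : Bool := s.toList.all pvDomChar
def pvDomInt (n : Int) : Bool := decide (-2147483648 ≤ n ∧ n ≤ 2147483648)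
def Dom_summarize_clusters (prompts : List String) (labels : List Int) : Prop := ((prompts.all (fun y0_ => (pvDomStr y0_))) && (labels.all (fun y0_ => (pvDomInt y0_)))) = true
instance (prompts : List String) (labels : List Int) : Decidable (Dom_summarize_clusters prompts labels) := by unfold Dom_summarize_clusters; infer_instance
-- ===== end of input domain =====

-- B replaces A's hash-grouping + Counter.most_common pipeline with a distinct-labels pass, a per-label
-- rescan of the zipped input for its tokens, and a stable reverse sort of the distinct tokens keyed by
-- list.count (alternative decomposition; no speed claim).


-- ===== PORT A =====
-- Counter.most_common(n): stable sort of the counter's items by count, descending, truncated to n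
-- (CPython documents most_common as equivalent to sorted(c.items(), key=itemgetter(1), reverse=True)[:n]).
def pyMostCommon (c : PySem.Dict String Int) (n : Nat) : List (String × Int) :=
  (PySem.List.sorted c.items (fun p => p.2) true).take n

def summarize_clusters (prompts : List String) (labels : List Int) : List (Int × String) :=
  let clusters : PySem.Dict Int (List String) :=
    (labels.zip prompts).foldl
      (fun d p => d.modify p.1 [] (fun xs => xs ++ [p.2])) PySem.Dict.empty
  let summaries : PySem.Dict Int String :=
    clusters.items.foldl
      (fun s p =>
        if p.1 == -1 then s.insert p.1 "noise"
        else
          let words := PySem.Str.split₀ (PySem.Str.lower (PySem.Str.join " " p.2))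
          let common := ((pyMostCommon (PySem.Dict.counter words) 10).filter
              (fun q => 3 < PySem.Str.len q.1)).map (fun q => q.1)
          s.insert p.1 (if common.isEmpty then "" else PySem.Str.join " " (common.take 5)))
      PySem.Dict.empty
  summaries.items

-- ===== PORT B =====
def summarize_clusters_alt (prompts : List String) (labels : List Int) : List (Int × String) :=
  let n := min prompts.length labels.length
  let ils := labels.take n            -- int(l) is the identity on Int
  let out : PySem.Dict Int String :=
    (PySem.List.dedup ils).foldl
      (fun s l =>
        if l == -1 then s.insert l "noise"
        else
          let toks := ((ils.zip prompts).filter (fun p => p.1 == l)).flatMap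
              (fun p => PySem.Str.split₀ (PySem.Str.lower p.2))
          let ranked := (PySem.List.sorted (PySem.List.dedup toks)
              (fun w => (toks.count w : Int)) true).take 10
          let good := ranked.filter (fun w => 3 < PySem.Str.len w)
          s.insert l (if good.isEmpty then "" else PySem.Str.join " " (good.take 5)))
      PySem.Dict.empty
  out.items

-- ===== PRECONDITION & SPEC =====
def Spec_summarize_clusters (prompts : List String) (labels : List Int) (out : List (Int × String)) : Prop := out = summarize_clusters_alt prompts labels
instance (prompts : List String) (labels : List Int) (out : List (Int × String)) : Decidable (Spec_summarize_clusters prompts labels out) := by unfold Spec_summarize_clusters; infer_instance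

-- ===== CLAIM (what is proved, stated in full; the proofs are below) =====
def Claim_equal_summarize_clusters : Prop := ∀ (prompts : List String) (labels : List Int), Dom_summarize_clusters prompts labels → Spec_summarize_clusters prompts labels (summarize_clusters prompts labels)

-- ===== LEMMAS AND PROOFS =====

-- ---- zip truncation facts ----
theorem zip_take_min (l1 : List Int) : ∀ (l2 : List String),
    (l1.take (min l2.length l1.length)).zip l2 = l1.zip l2 := by
  induction l1 with
  | nil => intro l2; simp
  | cons a l1 ih =>
      intro l2
      cases l2 with
      | nil => simp
      | cons b l2 =>
          simp only [List.length_cons, List.zip_cons_cons]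
          have hmin : min (l2.length + 1) (l1.length + 1) = min l2.length l1.length + 1 := by omega
          rw [hmin, List.take_succ_cons, List.zip_cons_cons, ih l2]

-- ---- sorted commutes with map (used to relate Counter items to B's distinct-token sort) ----
theorem insertBy_map {α β : Type} (f : α → β) (b : β → β → Bool) (b' : α → α → Bool)
    (hb : ∀ a c, b (f a) (f c) = b' a c) (x : α) :
    ∀ ys : List α, PySem.List.insertBy b (f x) (ys.map f) = (PySem.List.insertBy b' x ys).map f := by
  intro ys
  induction ys with
  | nil => simp [PySem.List.insertBy]
  | cons y ys ih =>
      simp only [List.map_cons, PySem.List.insertBy, hb x y]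
      by_cases h : b' x y = true
      · simp [h]
      · simp only [eq_false_of_ne_true h, Bool.false_eq_true, if_false, List.map_cons]
        rw [ih]

theorem foldl_insertBy_map {α β : Type} (f : α → β) (b : β → β → Bool) (b' : α → α → Bool)
    (hb : ∀ a c, b (f a) (f c) = b' a c) (xs : List α) :
    ∀ acc : List α,
      xs.foldl (fun acc x => PySem.List.insertBy b (f x) acc) (acc.map f) =
        (xs.foldl (fun acc x => PySem.List.insertBy b' x acc) acc).map f := by
  induction xs with
  | nil => intro acc; rfl
  | cons x xs ih =>
      intro acc
      simp only [List.foldl_cons]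
      rw [insertBy_map f b b' hb x acc]
      exact ih _

theorem sorted_map {α β κ : Type} [LT κ] [DecidableLT κ]
    (xs : List α) (f : α → β) (key : β → κ) (rev : Bool) :
    PySem.List.sorted (xs.map f) key rev = (PySem.List.sorted xs (fun a => key (f a)) rev).map f := by
  simp only [PySem.List.sorted]
  rw [List.foldl_map]
  have h := foldl_insertBy_map f
      (if rev = true then fun a b => decide (key b < key a) else fun a b => decide (key a < key b))
      (if rev = true then fun a b => decide (key (f b) < key (f a)) else fun a b => decide (key (f a) < key (f b)))
      (by intro a c; cases rev <;> simp) xs []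
  simpa using h

-- ---- top-word selection: A's path through Counter equals B's sort of the distinct tokens ----
theorem topwords (ws : List String) :
    ((pyMostCommon (PySem.Dict.counter ws) 10).filter (fun q => 3 < PySem.Str.len q.1)).map (fun q => q.1)
      = ((PySem.List.sorted (PySem.Set.ofList ws) (fun w => (ws.count w : Int)) true).take 10).filter
          (fun w => 3 < PySem.Str.len w) := by
  unfold pyMostCommon
  rw [PySem.Dict.items_counter]
  rw [sorted_map (PySem.Set.ofList ws) (fun k => (k, (ws.count k : Int))) (fun p => p.2) true]
  rw [← List.map_take, List.filter_map, List.map_map]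
  simp only [Function.comp_def]
  simp

-- ---- string lemmas: split() of a " "-join is the concatenation of the splits ----
def pyTok (s : String) : List String := PySem.Str.split₀ (PySem.Str.lower s)

theorem go_acc (s : List Char) :
    ∀ (cur : List Char) (acc : List (List Char)),
      PySem.Chars.split₀.go s cur acc = acc.reverse ++ PySem.Chars.split₀.go s cur [] := by
  induction s with
  | nil =>
      intro cur acc
      simp only [PySem.Chars.split₀.go]
      split_ifs <;> simp
  | cons c rest ih =>
      intro cur acc
      by_cases hs : PySem.Chars.isspace c = true
      · by_cases hc : cur.isEmpty = true
        · simp only [PySem.Chars.split₀.go, hs, hc, if_true]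
          exact ih [] acc
        · simp only [PySem.Chars.split₀.go, hs, hc, if_true]
          rw [ih [] (cur.reverse :: acc), ih [] [cur.reverse]]
          simp
      · simp only [PySem.Chars.split₀.go, eq_false_of_ne_true hs]
        exact ih (c :: cur) acc

theorem go_append_space (b : List Char) :
    ∀ (a cur : List Char),
      PySem.Chars.split₀.go (a ++ ' ' :: b) cur [] =
        PySem.Chars.split₀.go a cur [] ++ PySem.Chars.split₀.go b [] [] := by
  intro a
  induction a with
  | nil =>
      intro cur
      have hsp : PySem.Chars.isspace ' ' = true := by decide
      by_cases hc : cur.isEmpty = true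
      · simp [List.nil_append, PySem.Chars.split₀.go, hsp, hc]
      · simp only [List.nil_append, PySem.Chars.split₀.go, hsp, hc, if_true]
        rw [go_acc b [] [cur.reverse]]
        simp
  | cons c a' ih =>
      intro cur
      by_cases hs : PySem.Chars.isspace c = true
      · by_cases hc : cur.isEmpty = true
        · simp only [List.cons_append, PySem.Chars.split₀.go, hs, hc, if_true]
          exact ih []
        · simp only [List.cons_append, PySem.Chars.split₀.go, hs, hc, if_true]
          rw [go_acc (a' ++ ' ' :: b) [] [cur.reverse], go_acc a' [] [cur.reverse], ih []]
          simp
      · simp only [List.cons_append, PySem.Chars.split₀.go, eq_false_of_ne_true hs]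
        exact ih (c :: cur)

theorem split₀_append_space (a b : List Char) :
    PySem.Chars.split₀ (a ++ ' ' :: b) = PySem.Chars.split₀ a ++ PySem.Chars.split₀ b := by
  simp only [PySem.Chars.split₀]
  exact go_append_space b a []

theorem lower_append (a b : List Char) :
    PySem.Chars.lower (a ++ b) = PySem.Chars.lower a ++ PySem.Chars.lower b := by
  simp [PySem.Chars.lower]

theorem lower_space : PySem.Chars.lower [' '] = [' '] := by decide

theorem lower_join (L : List (List Char)) :
    PySem.Chars.lower (PySem.Chars.join [' '] L) = PySem.Chars.join [' '] (L.map PySem.Chars.lower) := by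
  induction L with
  | nil => simp [PySem.Chars.join_nil, PySem.Chars.lower]
  | cons p rest ih =>
      cases rest with
      | nil => simp [PySem.Chars.join_singleton]
      | cons q rest' =>
          simp only [List.map_cons] at ih ⊢
          rw [PySem.Chars.join_cons_cons, PySem.Chars.join_cons_cons,
              lower_append, lower_append, lower_space, ih]

theorem split₀_join (M : List (List Char)) :
    PySem.Chars.split₀ (PySem.Chars.join [' '] M) = M.flatMap PySem.Chars.split₀ := by
  induction M with
  | nil => simp [PySem.Chars.join_nil, PySem.Chars.split₀, PySem.Chars.split₀.go]
  | cons p rest ih =>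
      cases rest with
      | nil => simp [PySem.Chars.join_singleton]
      | cons q rest' =>
          rw [PySem.Chars.join_cons_cons, List.flatMap_cons]
          have : p ++ [' '] ++ PySem.Chars.join [' '] (q :: rest') =
              p ++ ' ' :: PySem.Chars.join [' '] (q :: rest') := by simp
          rw [this, split₀_append_space, ih]

-- A's words ( " ".join(items).lower().split() ) are the items' token lists, concatenated.
theorem words_eq (parts : List String) :
    PySem.Str.split₀ (PySem.Str.lower (PySem.Str.join " " parts)) = parts.flatMap pyTok := by
  simp only [PySem.Str.split₀, PySem.Str.lower, PySem.Str.join, String.toList_ofList]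
  have hsep : (" " : String).toList = [' '] := rfl
  rw [hsep, lower_join, split₀_join, List.map_map, List.flatMap_map, List.map_flatMap]
  congr 1
  funext a
  simp [pyTok, PySem.Str.split₀, PySem.Str.lower, Function.comp, String.toList_ofList]

-- ---- named forms of the two loop bodies' inserted values (definitionally equal to the ports) ----
def valA (p : Int × List String) : String :=
  if p.1 == -1 then "noise"
  else
    let words := PySem.Str.split₀ (PySem.Str.lower (PySem.Str.join " " p.2))
    let common := ((pyMostCommon (PySem.Dict.counter words) 10).filter
        (fun q => 3 < PySem.Str.len q.1)).map (fun q => q.1)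
    if common.isEmpty then "" else PySem.Str.join " " (common.take 5)

def valB (ils : List Int) (prompts : List String) (l : Int) : String :=
  if l == -1 then "noise"
  else
    let toks := ((ils.zip prompts).filter (fun p => p.1 == l)).flatMap
        (fun p => PySem.Str.split₀ (PySem.Str.lower p.2))
    let ranked := (PySem.List.sorted (PySem.List.dedup toks)
        (fun w => (toks.count w : Int)) true).take 10
    let good := ranked.filter (fun w => 3 < PySem.Str.len w)
    if good.isEmpty then "" else PySem.Str.join " " (good.take 5)

def gA (s : PySem.Dict Int String) (p : Int × List String) : PySem.Dict Int String :=
  if p.1 == -1 then s.insert p.1 "noise"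
  else
    let words := PySem.Str.split₀ (PySem.Str.lower (PySem.Str.join " " p.2))
    let common := ((pyMostCommon (PySem.Dict.counter words) 10).filter
        (fun q => 3 < PySem.Str.len q.1)).map (fun q => q.1)
    s.insert p.1 (if common.isEmpty then "" else PySem.Str.join " " (common.take 5))

def gB (ils : List Int) (prompts : List String) (s : PySem.Dict Int String) (l : Int) :
    PySem.Dict Int String :=
  if l == -1 then s.insert l "noise"
  else
    let toks := ((ils.zip prompts).filter (fun p => p.1 == l)).flatMap
        (fun p => PySem.Str.split₀ (PySem.Str.lower p.2))
    let ranked := (PySem.List.sorted (PySem.List.dedup toks)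
        (fun w => (toks.count w : Int)) true).take 10
    let good := ranked.filter (fun w => 3 < PySem.Str.len w)
    s.insert l (if good.isEmpty then "" else PySem.Str.join " " (good.take 5))

theorem A_unfold (prompts : List String) (labels : List Int) :
    summarize_clusters prompts labels =
      (((labels.zip prompts).foldl
          (fun d p => d.modify p.1 [] (fun xs => xs ++ [p.2])) PySem.Dict.empty).items.foldl
        gA PySem.Dict.empty).items := rfl

theorem B_unfold (prompts : List String) (labels : List Int) :
    summarize_clusters_alt prompts labels =
      ((PySem.List.dedup (labels.take (min prompts.length labels.length))).foldl
        (gB (labels.take (min prompts.length labels.length)) prompts)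
        PySem.Dict.empty).items := rfl

theorem gA_eq : gA = fun s p => s.insert p.1 (valA p) := by
  funext s p
  by_cases h : (p.1 == -1) = true
  · simp [gA, valA, h]
  · simp only [gA, valA, eq_false_of_ne_true h, Bool.false_eq_true, if_false]

theorem gB_eq (ils : List Int) (prompts : List String) :
    gB ils prompts = fun s l => s.insert l (valB ils prompts l) := by
  funext s l
  by_cases h : (l == -1) = true
  · simp [gB, valB, h]
  · simp only [gB, valB, eq_false_of_ne_true h, Bool.false_eq_true, if_false]

-- per-label agreement of the two inserted values
theorem val_eq (ils : List Int) (prompts : List String) (l : Int) :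
    valA (l, ((ils.zip prompts).filter (fun p => p.1 == l)).map (fun p => p.2)) =
      valB ils prompts l := by
  by_cases h : (l == -1) = true
  · simp [valA, valB, h]
  · simp only [valA, valB, eq_false_of_ne_true h, Bool.false_eq_true, if_false]
    rw [words_eq, List.flatMap_map, PySem.List.dedup_eq_ofList]
    have hw : ((ils.zip prompts).filter (fun p => p.1 == l)).flatMap (fun a => pyTok a.2) =
        ((ils.zip prompts).filter (fun p => p.1 == l)).flatMap
          (fun p => PySem.Str.split₀ (PySem.Str.lower p.2)) := rfl
    rw [hw, topwords]

-- ===== VERDICT (by name: the statement is the Claim_ definition above) =====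
theorem summarize_clusters_spec : Claim_equal_summarize_clusters := by
  intro prompts labels _
  unfold Spec_summarize_clusters
  rw [A_unfold, B_unfold, gA_eq, gB_eq]
  set ils := labels.take (min prompts.length labels.length) with hils
  have hzip : ils.zip prompts = labels.zip prompts := zip_take_min labels prompts
  rw [← hzip]
  set clusters := ((ils.zip prompts).foldl
      (fun d p => d.modify p.1 [] (fun xs => xs ++ [p.2])) PySem.Dict.empty) with hcl
  have hfst : (ils.zip prompts).map (fun p => p.1) = ils := by
    rw [show (fun p : Int × String => p.1) = Prod.fst from rfl]
    apply List.map_fst_zip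
    rw [hils]; simp
  have hkeys : clusters.keys = PySem.Set.ofList ils := by
    rw [hcl, PySem.Dict.keys_foldl_modify_key (ils.zip prompts) (fun p => p.1) []
        (fun _ p => (fun xs => xs ++ [p.2])) PySem.Dict.empty]
    rw [hfst]
    rw [show (PySem.Dict.empty : PySem.Dict Int (List String)).keys = [] from rfl]
    exact PySem.Set.update_nil_left ils
  have hnodup : clusters.keys.Nodup := by rw [hkeys]; exact PySem.Set.nodup_ofList ils
  have hitems : clusters.items =
      (PySem.Set.ofList ils).map
        (fun l => (l, ((ils.zip prompts).filter (fun p => p.1 == l)).map (fun p => p.2))) := by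
    rw [PySem.Dict.items_eq_map_keys clusters hnodup [], hkeys]
    apply List.map_congr_left
    intro l _
    have hget : clusters.getD l [] =
        ((ils.zip prompts).filter (fun p => p.1 == l)).map (fun p => p.2) := by
      rw [hcl, PySem.Dict.getD_foldl_modify_append]
      rw [show (PySem.Dict.empty : PySem.Dict Int (List String)).getD l [] = [] from rfl]
      rfl
    rw [hget]
  have hmapnodup : (clusters.items.map (fun p => p.1)).Nodup := by
    rw [show clusters.items.map (fun p => p.1) = clusters.keys from rfl]
    exact hnodup
  rw [PySem.Dict.items_foldl_insert_fresh clusters.items (fun p => p.1) valA PySem.Dict.empty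
      (fun p _ => PySem.Dict.contains_empty p.1) hmapnodup]
  have hBnodup : ((PySem.List.dedup ils).map (fun l => l)).Nodup := by
    rw [List.map_id', PySem.List.dedup_eq_ofList]
    exact PySem.Set.nodup_ofList ils
  rw [PySem.Dict.items_foldl_insert_fresh (PySem.List.dedup ils) (fun l => l)
      (valB ils prompts) PySem.Dict.empty (fun a _ => PySem.Dict.contains_empty a) hBnodup]
  rw [show (PySem.Dict.empty : PySem.Dict Int String).items = [] from rfl]
  rw [List.nil_append, List.nil_append, hitems, PySem.List.dedup_eq_ofList, List.map_map]
  apply List.map_congr_left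
  intro l _
  simp only [Function.comp_def]
  rw [val_eq ils prompts l]
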